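-- pv_equiv track=rewrite | github.com/shinkeonkim/today-ps | BOJ/05000~05999/5100~5199/5177.py | rm_special_blank
-- ===== SOURCE A (Python) =====
-- special = "().;:"
--
-- def rm_special_blank(s):
--     while True:
--         n = len(s)
--         chk = True
--         for i in range(1, n):
--             if s[i] in special and s[i-1] == ' ':
--                 s = s[:(i-1)] + s[i:]
--                 chk = False
--                 break
--         if chk:
--             break
--
--     while True:
--         n = len(s)
--         chk = True
--         for i in range(0, n-1):
--             if s[i] in special and s[i+1] == ' ':
--                 s = s[:(i+1)] + s[(i+2):]
--                 chk = False
--                 break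
--         if chk:
--             break
--     return s
-- ===== SOURCE B (Python) =====
-- special = "().;:"
--
-- def _strip_after(chars):
--     # one pass: drop each space whose nearest non-space to the left is special
--     out = []
--     drop = False
--     for c in chars:
--         if c == ' ':
--             if not drop:
--                 out.append(c)
--         else:
--             drop = c in special
--             out.append(c)
--     return out
--
-- def rm_special_blank(s):
--     # left pass on the reversed string removes spaces before specials,
--     # then a direct pass removes spaces after specials
--     t = _strip_after(reversed(s))[::-1]
--     return ''.join(_strip_after(t))
-- ===== Notes on version B (the rewrite author's own statement) =====
-- stated objective: alternative
-- what changed: Replaces A's two fixpoint loops (each rescanning from the start after every single-character deletion) by two single flag-carrying passes: one over the reversed string dropping spaces that precede a special character, then one direct pass dropping spaces that follow one.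
import Mathlib
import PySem

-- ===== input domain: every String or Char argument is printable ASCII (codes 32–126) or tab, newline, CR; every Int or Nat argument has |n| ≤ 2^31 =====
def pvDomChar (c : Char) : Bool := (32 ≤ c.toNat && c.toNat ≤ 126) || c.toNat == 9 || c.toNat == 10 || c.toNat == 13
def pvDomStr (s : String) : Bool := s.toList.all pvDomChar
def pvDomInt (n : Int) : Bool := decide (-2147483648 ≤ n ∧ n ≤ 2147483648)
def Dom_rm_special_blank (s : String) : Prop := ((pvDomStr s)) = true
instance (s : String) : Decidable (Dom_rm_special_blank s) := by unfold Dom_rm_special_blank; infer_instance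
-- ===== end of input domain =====

-- B replaces A's restart-the-scan removal loops by two single flag-carrying passes
-- (one over the reversed string, one direct); same return value, no side effects involved.

-- ===== PORT A =====
-- special = "().;:"
def specialL : List Char := ['(', ')', '.', ';', ':']

-- first pass's inner for-loop: first i in range(1, n) with s[i] in special and s[i-1] == ' '
def find1 (s : List Char) (i : Nat) : Option Nat :=
  if i < s.length then
    if s.getD i ' ' ∈ specialL ∧ s.getD (i-1) ' ' = ' ' then some i
    else find1 s (i+1)
  else none
termination_by s.length - i

-- bounds needed by pass1's termination
theorem find1_some_bounds (s : List Char) (i j : Nat) (h : find1 s i = some j) :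
    i ≤ j ∧ j < s.length ∧ s.getD j ' ' ∈ specialL ∧ s.getD (j-1) ' ' = ' ' := by
  fun_induction find1 s i with
  | case1 i hi hp => cases h; exact ⟨le_refl _, hi, hp⟩
  | case2 i hi hp ih =>
    obtain ⟨h1, h2⟩ := ih h
    exact ⟨by omega, h2⟩
  | case3 i hi => cases h

-- first while-loop: remove s[i-1] (s[:(i-1)] + s[i:]) and restart until no hit
def pass1 (s : List Char) : List Char :=
  match h : find1 s 1 with
  | none => s
  | some i => pass1 (s.take (i-1) ++ s.drop i)
termination_by s.length
decreasing_by
  have hb := find1_some_bounds s 1 i h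
  simp [List.length_append, List.length_take, List.length_drop]
  omega

-- second for-loop: first i in range(0, n-1) with s[i] in special and s[i+1] == ' '
def find2 (s : List Char) (i : Nat) : Option Nat :=
  if i + 1 < s.length then
    if s.getD i ' ' ∈ specialL ∧ s.getD (i+1) ' ' = ' ' then some i
    else find2 s (i+1)
  else none
termination_by s.length - i

-- bounds needed by pass2's termination
theorem find2_some_bounds (s : List Char) (i j : Nat) (h : find2 s i = some j) :
    i ≤ j ∧ j + 1 < s.length ∧ s.getD j ' ' ∈ specialL ∧ s.getD (j+1) ' ' = ' ' := by
  fun_induction find2 s i with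
  | case1 i hi hp => cases h; exact ⟨le_refl _, hi, hp⟩
  | case2 i hi hp ih =>
    obtain ⟨h1, h2⟩ := ih h
    exact ⟨by omega, h2⟩
  | case3 i hi => cases h

-- second while-loop: remove s[i+1] (s[:(i+1)] + s[(i+2):]) and restart until no hit
def pass2 (s : List Char) : List Char :=
  match h : find2 s 0 with
  | none => s
  | some i => pass2 (s.take (i+1) ++ s.drop (i+2))
termination_by s.length
decreasing_by
  have hb := find2_some_bounds s 0 i h
  simp [List.length_append, List.length_take, List.length_drop]
  omega

def rm_special_blank (s : String) : String :=
  String.ofList (pass2 (pass1 s.toList))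

-- ===== PORT B =====
-- _strip_after: one pass with a drop flag; drops each space whose nearest
-- non-space to the left (in traversal order) is a special character
def stripAfter (cs : List Char) (drop : Bool) : List Char :=
  match cs with
  | [] => []
  | c :: rest =>
    if c = ' ' then
      if drop then stripAfter rest drop else c :: stripAfter rest drop
    else
      c :: stripAfter rest (decide (c ∈ specialL))

def rm_special_blank_alt (s : String) : String :=
  String.ofList (stripAfter (stripAfter s.toList.reverse false).reverse false)

-- ===== PRECONDITION & SPEC =====
def Spec_rm_special_blank (s : String) (out : String) : Prop := out = rm_special_blank_alt s
instance (s : String) (out : String) : Decidable (Spec_rm_special_blank s out) := by unfold Spec_rm_special_blank; infer_instance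

-- ===== CLAIM (what is proved, stated in full; the proofs are below) =====
def Claim_equal_rm_special_blank : Prop := ∀ (s : String), Dom_rm_special_blank s → Spec_rm_special_blank s (rm_special_blank s)

-- ===== LEMMAS AND PROOFS =====

theorem special_ne_space {c : Char} (h : c ∈ specialL) : c ≠ ' ' := by
  simp [specialL] at h
  rcases h with h | h | h | h | h <;> subst h <;> decide

-- the drop flag after a list is the fold of the per-char update
def safState (cs : List Char) (d : Bool) : Bool :=
  cs.foldl (fun d c => if c = ' ' then d else decide (c ∈ specialL)) d

theorem stripAfter_append (u v : List Char) (d : Bool) :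
    stripAfter (u ++ v) d = stripAfter u d ++ stripAfter v (safState u d) := by
  induction u generalizing d with
  | nil => simp [stripAfter, safState]
  | cons c rest ih =>
    by_cases hc : c = ' ' <;> cases d <;>
      simp [stripAfter, safState, hc, List.foldl_cons] <;>
      rw [ih] <;> simp [safState]

-- deleting one space right after a special does not change the pass's output
theorem strip_insert (u v : List Char) (c : Char) (hc : c ∈ specialL) (d : Bool) :
    stripAfter (u ++ c :: ' ' :: v) d = stripAfter (u ++ c :: v) d := by
  rw [stripAfter_append, stripAfter_append]
  have hcs := special_ne_space hc
  simp [stripAfter, hcs, hc]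

-- a list with no special-then-space pair is a fixpoint of the pass
theorem stripAfter_id (l : List Char) (d : Bool)
    (hp : ∀ k, k + 1 < l.length → ¬(l.getD k ' ' ∈ specialL ∧ l.getD (k+1) ' ' = ' '))
    (hd : d = true → ∀ x rest, l = x :: rest → x ≠ ' ') :
    stripAfter l d = l := by
  induction l generalizing d with
  | nil => simp [stripAfter]
  | cons c rest ih =>
    have hshift : ∀ k, k + 1 < rest.length →
        ¬(rest.getD k ' ' ∈ specialL ∧ rest.getD (k+1) ' ' = ' ') := by
      intro k hk
      have := hp (k+1) (by simpa using by omega)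
      simpa using this
    by_cases hc : c = ' '
    · have hdf : d = false := by
        cases d
        · rfl
        · exact absurd hc (hd rfl c rest rfl)
      subst hdf; subst hc
      rw [show stripAfter (' ' :: rest) false = ' ' :: stripAfter rest false from by
        simp [stripAfter]]
      rw [ih false hshift (by simp)]
    · simp only [stripAfter, if_neg hc]
      rw [ih _ hshift]
      intro hmem x r hr
      subst hr
      intro hx
      have h0 := hp 0 (by simp)
      simp [hx] at h0
      exact h0 (by simpa using hmem)

theorem find1_none (s : List Char) (i : Nat) (h : find1 s i = none) :
    ∀ k, i ≤ k → k < s.length → ¬(s.getD k ' ' ∈ specialL ∧ s.getD (k-1) ' ' = ' ') := by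
  fun_induction find1 s i with
  | case1 i hi hp => cases h
  | case2 i hi hp ih =>
    intro k hik hk
    rcases Nat.eq_or_lt_of_le hik with rfl | hlt
    · exact hp
    · exact ih h k hlt hk
  | case3 i hi =>
    intro k hik hk
    omega

theorem find2_none (s : List Char) (i : Nat) (h : find2 s i = none) :
    ∀ k, i ≤ k → k + 1 < s.length → ¬(s.getD k ' ' ∈ specialL ∧ s.getD (k+1) ' ' = ' ') := by
  fun_induction find2 s i with
  | case1 i hi hp => cases h
  | case2 i hi hp ih =>
    intro k hik hk
    rcases Nat.eq_or_lt_of_le hik with rfl | hlt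
    · exact hp
    · exact ih h k hlt hk
  | case3 i hi =>
    intro k hik hk
    omega

-- the second while-loop computes exactly B's direct pass
theorem pass2_eq (s : List Char) : pass2 s = stripAfter s false := by
  fun_induction pass2 s with
  | case1 s h =>
    refine (stripAfter_id s false ?_ (by simp)).symm
    intro k hk
    exact find2_none s 0 h k (Nat.zero_le k) hk
  | case2 s i h ih =>
    obtain ⟨-, hlen, hsp, hspc⟩ := find2_some_bounds s 0 i h
    have hi : i < s.length := by omega
    have hgi : s.getD i ' ' = s[i] := List.getD_eq_getElem s ' ' hi
    have hgi1 : s.getD (i+1) ' ' = s[i+1] := List.getD_eq_getElem s ' ' hlen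
    have h2 : s.drop i = s[i] :: ' ' :: s.drop (i+2) := by
      rw [List.drop_eq_getElem_cons hi, List.drop_eq_getElem_cons hlen, ← hgi1, hspc]
    have hdec : s = s.take i ++ s[i] :: ' ' :: s.drop (i+2) := by
      conv_lhs => rw [← List.take_append_drop i s, h2]
    have hrm : s.take (i+1) ++ s.drop (i+2) = s.take i ++ s[i] :: s.drop (i+2) := by
      rw [List.take_succ_eq_append_getElem hi, List.append_assoc, List.singleton_append]
    rw [ih, hrm]
    conv_rhs => rw [hdec]
    rw [strip_insert _ _ _ (hgi ▸ hsp)]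

-- the first while-loop computes B's reversed pass
theorem pass1_eq (s : List Char) : pass1 s = (stripAfter s.reverse false).reverse := by
  fun_induction pass1 s with
  | case1 s h =>
    have hnp : ∀ k, k + 1 < s.reverse.length →
        ¬(s.reverse.getD k ' ' ∈ specialL ∧ s.reverse.getD (k+1) ' ' = ' ') := by
      intro k hk
      rw [List.length_reverse] at hk
      have hk0 : k < s.length := by omega
      have hk1 : k + 1 < s.length := hk
      have e0 : s.reverse.getD k ' ' = s.getD (s.length - 1 - k) ' ' := by
        rw [List.getD_eq_getElem _ ' ' (by simpa using hk0),
            List.getElem_reverse,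
            List.getD_eq_getElem _ ' ' (by omega)]
      have e1 : s.reverse.getD (k+1) ' ' = s.getD (s.length - 1 - k - 1) ' ' := by
        rw [List.getD_eq_getElem _ ' ' (by simpa using hk1),
            List.getElem_reverse,
            List.getD_eq_getElem _ ' ' (by omega)]
        congr 1
      rw [e0, e1]
      exact find1_none s 1 h (s.length - 1 - k) (by omega) (by omega)
    rw [stripAfter_id s.reverse false hnp (by simp), List.reverse_reverse]
  | case2 s i h ih =>
    obtain ⟨h1, hlen, hsp, hspc⟩ := find1_some_bounds s 1 i h
    have hi1 : i - 1 < s.length := by omega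
    have hgi : s.getD i ' ' = s[i] := List.getD_eq_getElem s ' ' hlen
    have hgi1 : s.getD (i-1) ' ' = s[i-1] := List.getD_eq_getElem s ' ' hi1
    have h2 : s.drop (i-1) = ' ' :: s[i] :: s.drop (i+1) := by
      rw [List.drop_eq_getElem_cons hi1, ← hgi1, hspc,
        show i - 1 + 1 = i from by omega, List.drop_eq_getElem_cons hlen]
    have hdec : s = s.take (i-1) ++ ' ' :: s[i] :: s.drop (i+1) := by
      conv_lhs => rw [← List.take_append_drop (i-1) s, h2]
    have hrm : s.take (i-1) ++ s.drop i = s.take (i-1) ++ s[i] :: s.drop (i+1) := by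
      rw [List.drop_eq_getElem_cons hlen]
    rw [ih, hrm]
    have hrev : (s.take (i-1) ++ s[i] :: s.drop (i+1)).reverse
        = (s.drop (i+1)).reverse ++ s[i] :: (s.take (i-1)).reverse := by
      rw [List.reverse_append, List.reverse_cons, List.append_assoc, List.singleton_append]
    have hrevs : s.reverse
        = (s.drop (i+1)).reverse ++ s[i] :: ' ' :: (s.take (i-1)).reverse := by
      conv_lhs => rw [hdec]
      rw [List.reverse_append, List.reverse_cons, List.reverse_cons,
        List.append_assoc, List.append_assoc, List.singleton_append, List.singleton_append]
    rw [hrev, hrevs, strip_insert _ _ _ (hgi ▸ hsp)]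

-- ===== VERDICT (by name: the statement is the Claim_ definition above) =====
theorem rm_special_blank_spec : Claim_equal_rm_special_blank := by
  intro s _
  unfold Spec_rm_special_blank rm_special_blank rm_special_blank_alt
  rw [pass1_eq, pass2_eq]
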